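-- pv_equiv track=rewrite | github.com/joeloskarsson/SplitNotes | note_reader.py | encode_notes
-- ===== SOURCE A (Python) =====
-- def encode_notes(note_lines):
-- 	"""
-- 	Takes a list containing strings.
-- 	Encodes given strings according to the note formatting.
-- 	Returns the list containing the notes for every split.
-- 	"""
--
-- 	def is_title(line):
-- 		if not line:
-- 			return False
--
-- 		return (line[0] == "[") and (line[-1] == "]")
--
-- 	def is_newline(line):
-- 		return (line == "\n") or (line == "\r")
--
-- 	def remove_new_line(line):
-- 		if (len(line) >= 1) and (is_newline(line[-1])):
-- 			return line[:-1]
-- 		else: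
-- 			return line
--
-- 	note_list = []
-- 	cur_notes = ""
--
-- 	for line in note_lines:
-- 		# remove whitespace at beginning and end
-- 		line = line.strip(" ")
--
-- 		if is_newline(line):
-- 			if cur_notes:
-- 				note_list.append(cur_notes)
-- 				cur_notes = ""
-- 		else:
-- 			line = remove_new_line(line)
-- 			if not is_title(line):
-- 				cur_notes += line + "\n"  # newline
--
-- 	if cur_notes:
-- 		note_list.append(cur_notes)
--
-- 	return note_list
-- ===== SOURCE B (Python) =====
-- def encode_notes(note_lines):
-- 	"""
-- 	Run-based re-implementation: partition note_lines into maximal runs split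
-- 	by blank separator lines, then build each run's note string wholesale.
-- 	"""
--
-- 	def is_title(line):
-- 		return bool(line) and line[0] == "[" and line[-1] == "]"
--
-- 	def is_sep(line):
-- 		s = line.strip(" ")
-- 		return s == "\n" or s == "\r"
--
-- 	def process(line):
-- 		s = line.strip(" ")
-- 		if s and (s[-1] == "\n" or s[-1] == "\r"):
-- 			s = s[:-1]
-- 		return s
--
-- 	result = []
-- 	i, n = 0, len(note_lines)
-- 	while i < n:
-- 		if is_sep(note_lines[i]):
-- 			i += 1
-- 			continue
-- 		j = i
-- 		while j < n and not is_sep(note_lines[j]):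
-- 			j += 1
-- 		notes = "".join(p + "\n" for p in map(process, note_lines[i:j]) if not is_title(p))
-- 		if notes:
-- 			result.append(notes)
-- 		i = j
-- 	return result
-- ===== Notes on version B (the rewrite author's own statement) =====
-- stated objective: alternative
-- what changed: Replaced A's streaming character-accumulator loop (cur_notes built line by line, flushed at each blank line and at the end) by a run-partitioning scan: B splits note_lines into maximal runs separated by blank lines and builds each run's note string wholesale with a join over the processed, non-title lines.
import Mathlib
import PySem

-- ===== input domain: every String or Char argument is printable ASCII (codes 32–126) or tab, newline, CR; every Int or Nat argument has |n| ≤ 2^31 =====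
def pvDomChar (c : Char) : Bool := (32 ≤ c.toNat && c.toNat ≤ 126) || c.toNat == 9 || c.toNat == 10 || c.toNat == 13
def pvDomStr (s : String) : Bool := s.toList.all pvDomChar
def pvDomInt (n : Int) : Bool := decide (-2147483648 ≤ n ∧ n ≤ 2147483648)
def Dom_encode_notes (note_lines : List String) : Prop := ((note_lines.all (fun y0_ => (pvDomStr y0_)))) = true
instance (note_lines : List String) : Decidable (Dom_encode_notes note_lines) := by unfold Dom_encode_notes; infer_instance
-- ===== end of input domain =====

-- B replaces A's streaming accumulator loop by partitioning the input into maximal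
-- runs separated by blank lines and building each run's note string wholesale
-- (objective: alternative decomposition; same cost).
-- Strings are handled internally as List Char (PySem.Chars), exact on the domain.

-- ===== PORT A =====
def pvIsTitle (line : List Char) : Bool :=
  if line.isEmpty then false
  else (PySem.List.pyGet? line 0 == some '[') && (PySem.List.pyGet? line (-1) == some ']')

def pvIsNewline (line : List Char) : Bool :=
  line == ['\n'] || line == ['\r']

def pvRemoveNewLine (line : List Char) : List Char :=
  match PySem.List.pyGet? line (-1) with
  | some c => if pvIsNewline [c] then PySem.List.slice line none (some (-1)) else line
  | none => line

def pvStepA (st : List String × List Char) (line : String) : List String × List Char :=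
  let l := PySem.Chars.stripChars line.toList [' ']
  if pvIsNewline l then
    if st.2 ≠ [] then (st.1 ++ [String.ofList st.2], []) else st
  else
    let l2 := pvRemoveNewLine l
    if ¬ pvIsTitle l2 then (st.1, st.2 ++ (l2 ++ ['\n'])) else st

def encode_notes (note_lines : List String) : List String :=
  let r := note_lines.foldl pvStepA ([], [])
  if r.2 ≠ [] then r.1 ++ [String.ofList r.2] else r.1

-- ===== PORT B =====
def pvIsTitleB (p : List Char) : Bool :=
  !p.isEmpty && (p.head? == some '[') && (p.getLast? == some ']')

def pvSep (line : String) : Bool :=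
  let s := PySem.Chars.stripChars line.toList [' ']
  s == ['\n'] || s == ['\r']

def pvProc (line : String) : List Char :=
  let s := PySem.Chars.stripChars line.toList [' ']
  match s.getLast? with
  | some c => if c = '\n' ∨ c = '\r' then s.dropLast else s
  | none => s

def pvNoteOf (run : List String) : List Char :=
  (((run.map pvProc).filter (fun p => !pvIsTitleB p)).map (fun p => p ++ ['\n'])).flatten

-- "append the note string only if it is non-empty"
def pvEmit (cs : List Char) : List String :=
  if cs ≠ [] then [String.ofList cs] else []

def encode_notes_alt_go : List String → List String
  | [] => []
  | l :: ls =>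
    if pvSep l then encode_notes_alt_go ls
    else
      pvEmit (pvNoteOf (l :: ls.takeWhile (fun x => !pvSep x))) ++
        encode_notes_alt_go (ls.dropWhile (fun x => !pvSep x))
termination_by ls => ls.length
decreasing_by
  · simp
  · simp only [List.length_cons]
    exact Nat.lt_succ_of_le (List.length_dropWhile_le _ _)

def encode_notes_alt (note_lines : List String) : List String :=
  encode_notes_alt_go note_lines

-- ===== PRECONDITION & SPEC =====
def Spec_encode_notes (note_lines : List String) (out : List String) : Prop := out = encode_notes_alt note_lines
instance (note_lines : List String) (out : List String) : Decidable (Spec_encode_notes note_lines out) := by unfold Spec_encode_notes; infer_instance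

-- ===== CLAIM (what is proved, stated in full; the proofs are below) =====
def Claim_equal_encode_notes : Prop := ∀ (note_lines : List String), Dom_encode_notes note_lines → Spec_encode_notes note_lines (encode_notes note_lines)

-- ===== LEMMAS AND PROOFS =====

-- A's helpers agree pointwise with B's helpers.
theorem pvIsTitle_eq (p : List Char) : pvIsTitle p = pvIsTitleB p := by
  rcases p with _ | ⟨c, t⟩
  · rfl
  · rcases List.eq_nil_or_concat t with h | ⟨t', d, h⟩ <;> subst h
    · simp [pvIsTitle, pvIsTitleB, PySem.List.pyGet?, PySem.List.pyIdx?]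
    · have h1 : PySem.List.pyGet? (c :: (t' ++ [d])) 0 = some c := by
        simp only [PySem.List.pyGet?, PySem.List.pyIdx?]
        have h : (0:Int) ≤ ↑t'.length + 1 := by positivity
        simp [h]
      have h2 : PySem.List.pyGet? (c :: (t' ++ [d])) (-1) = some d := by
        rw [show c :: (t' ++ [d]) = (c :: t') ++ [d] from rfl]
        simp [PySem.List.pyGet?, PySem.List.pyIdx?]
      have h3 : (c :: (t' ++ [d])).getLast? = some d := by
        rw [show c :: (t' ++ [d]) = (c :: t') ++ [d] from rfl]
        exact List.getLast?_concat
      simp [pvIsTitle, pvIsTitleB, h1, h2, h3]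

theorem pvRemoveNewLine_eq (line : String) :
    pvRemoveNewLine (PySem.Chars.stripChars line.toList [' ']) = pvProc line := by
  unfold pvRemoveNewLine pvProc
  rcases List.eq_nil_or_concat (PySem.Chars.stripChars line.toList [' ']) with h | ⟨t, c, h⟩ <;>
    rw [h]
  · rfl
  · simp [PySem.List.pyGet?, PySem.List.pyIdx?, pvIsNewline, pysem]

theorem pvIsNewline_eq (line : String) :
    pvIsNewline (PySem.Chars.stripChars line.toList [' ']) = pvSep line := rfl

def pvFinish (st : List String × List Char) : List String := st.1 ++ pvEmit st.2

theorem pvEmit_nil : pvEmit [] = [] := rfl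

theorem pvNoteOf_nil : pvNoteOf [] = [] := rfl

theorem pvNoteOf_cons (l : String) (rs : List String) :
    pvNoteOf (l :: rs) =
      (if pvIsTitleB (pvProc l) then [] else pvProc l ++ ['\n']) ++ pvNoteOf rs := by
  by_cases h : pvIsTitleB (pvProc l) <;> simp [pvNoteOf, h]

theorem pv_go_glue (ls : List String) :
    pvEmit (pvNoteOf (ls.takeWhile (fun x => !pvSep x))) ++
      encode_notes_alt_go (ls.dropWhile (fun x => !pvSep x)) = encode_notes_alt_go ls := by
  rcases ls with _ | ⟨l, ls⟩
  · simp [pvNoteOf_nil, pvEmit_nil, encode_notes_alt_go]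
  · by_cases h : pvSep l
    · simp [h, pvNoteOf_nil, pvEmit_nil, encode_notes_alt_go]
    · rw [List.takeWhile_cons, List.dropWhile_cons]
      simp only [h, Bool.not_false, if_pos]
      rw [encode_notes_alt_go]
      simp [h]

theorem pv_main (ls : List String) (acc : List String) (cur : List Char) :
    pvFinish (ls.foldl pvStepA (acc, cur)) =
      acc ++ (pvEmit (cur ++ pvNoteOf (ls.takeWhile (fun x => !pvSep x))) ++
        encode_notes_alt_go (ls.dropWhile (fun x => !pvSep x))) := by
  induction ls generalizing acc cur with
  | nil => simp [pvFinish, pvNoteOf_nil, encode_notes_alt_go]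
  | cons l ls ih =>
    rw [List.foldl_cons]
    have hstep : pvStepA (acc, cur) l =
        if pvSep l then (if cur ≠ [] then (acc ++ [String.ofList cur], []) else (acc, cur))
        else (if ¬ pvIsTitleB (pvProc l) then (acc, cur ++ (pvProc l ++ ['\n'])) else (acc, cur)) := by
      simp only [pvStepA, pvIsNewline_eq, pvRemoveNewLine_eq, pvIsTitle_eq]
    rw [hstep]
    by_cases hs : pvSep l
    · have hgo : encode_notes_alt_go (l :: ls) = encode_notes_alt_go ls := by
        rw [encode_notes_alt_go]; simp [hs]
      have htw : (l :: ls).takeWhile (fun x => !pvSep x) = [] := by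
        simp [hs]
      have hdw : (l :: ls).dropWhile (fun x => !pvSep x) = l :: ls := by
        simp [hs]
      rw [htw, hdw, hgo]
      by_cases hc : cur = []
      · subst hc
        simp [hs, ih, pvNoteOf_nil, pvEmit_nil, pv_go_glue]
      · have hcur : pvEmit cur = [String.ofList cur] := by simp [pvEmit, hc]
        simp [hs, hc, ih, pvNoteOf_nil, hcur, pv_go_glue, List.append_assoc]
    · have htw : (l :: ls).takeWhile (fun x => !pvSep x) = l :: ls.takeWhile (fun x => !pvSep x) := by
        simp [hs]
      have hdw : (l :: ls).dropWhile (fun x => !pvSep x) = ls.dropWhile (fun x => !pvSep x) := by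
        simp [hs]
      rw [htw, hdw, pvNoteOf_cons]
      by_cases ht : pvIsTitleB (pvProc l)
      · simp [hs, ht, ih]
      · simp [hs, ht, ih, List.append_assoc]

-- ===== VERDICT (by name: the statement is the Claim_ definition above) =====
theorem encode_notes_spec : Claim_equal_encode_notes := by
  intro note_lines _
  unfold Spec_encode_notes encode_notes encode_notes_alt
  have hfin : ∀ r : List String × List Char,
      (if r.2 ≠ [] then r.1 ++ [String.ofList r.2] else r.1) = pvFinish r := by
    intro r
    by_cases h : r.2 = [] <;> simp [pvFinish, pvEmit, h]
  rw [hfin, pv_main]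
  simp only [List.nil_append, pv_go_glue]
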